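-- pv_equiv track=rewrite | github.com/mlesnews/lumina-oss | scripts/python/youtube_to_holocron_transformer.py | _identify_expertise_areas
-- ===== SOURCE A (Python) =====
-- from typing import Dict, List, Any, Optional
-- from collections import defaultdict
--
-- def _identify_expertise_areas(videos: List[Dict[str, Any]]) -> List[str]:
--     """Identify specific expertise areas from video titles"""
--     expertise_keywords = defaultdict(int)
--     all_titles = " ".join([v.get("title", "").lower() for v in videos[:20]])
--
--     # Common expertise keywords
--     keywords = [
--         "python", "javascript", "react", "kubernetes", "docker",
--         "machine learning", "deep learning", "neural networks",
--         "system design", "architecture", "distributed systems",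
--         "startup", "business", "product", "entrepreneurship"
--     ]
--
--     for keyword in keywords:
--         if keyword in all_titles:
--             expertise_keywords[keyword] += all_titles.count(keyword)
--
--     # Return top 5 expertise areas
--     sorted_expertise = sorted(expertise_keywords.items(), key=lambda x: x[1], reverse=True)
--     return [kw for kw, count in sorted_expertise[:5]]
-- ===== SOURCE B (Python) =====
-- from typing import Dict, List, Any
--
-- def _identify_expertise_areas(videos: List[Dict[str, Any]]) -> List[str]:
--     """Identify specific expertise areas from video titles (top-5 by repeated first-max selection, no dict, no full sort)"""
--     all_titles = " ".join([v.get("title", "").lower() for v in videos[:20]])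
--
--     keywords = [
--         "python", "javascript", "react", "kubernetes", "docker",
--         "machine learning", "deep learning", "neural networks",
--         "system design", "architecture", "distributed systems",
--         "startup", "business", "product", "entrepreneurship"
--     ]
--
--     pairs = [(kw, all_titles.count(kw)) for kw in keywords if kw in all_titles]
--
--     result = []
--     for _ in range(5):
--         if not pairs:
--             break
--         best = pairs[0]
--         for p in pairs[1:]:
--             if p[1] > best[1]:
--                 best = p
--         result.append(best[0])
--         pairs.remove(best)
--     return result
-- ===== Notes on version B (the rewrite author's own statement) =====
-- stated objective: alternative
-- what changed: Replaces the defaultdict accumulation plus full stable sort-and-slice with a directly built filtered (keyword,count) pair list and five rounds of first-maximum selection (top-5 selection without sorting).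
import Mathlib
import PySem

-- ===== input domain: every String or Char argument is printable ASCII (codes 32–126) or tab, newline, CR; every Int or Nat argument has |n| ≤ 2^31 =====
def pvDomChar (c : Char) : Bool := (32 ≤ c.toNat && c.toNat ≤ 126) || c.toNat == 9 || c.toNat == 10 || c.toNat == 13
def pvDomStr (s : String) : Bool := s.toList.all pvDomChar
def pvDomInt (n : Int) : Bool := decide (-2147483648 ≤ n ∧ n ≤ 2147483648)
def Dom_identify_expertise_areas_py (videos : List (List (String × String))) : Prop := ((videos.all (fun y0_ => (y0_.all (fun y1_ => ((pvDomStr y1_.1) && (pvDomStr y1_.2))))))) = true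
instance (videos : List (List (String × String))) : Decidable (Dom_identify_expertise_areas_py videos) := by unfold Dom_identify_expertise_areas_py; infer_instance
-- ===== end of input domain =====

-- B replaces A's defaultdict accumulation + full stable sort + slice by a filtered (keyword, count)
-- pair list and five rounds of first-maximum selection (alternative algorithm, same results).

-- shared by both ports: both Pythons contain the identical keyword literal and the identical
-- `all_titles = " ".join([v.get("title", "").lower() for v in videos[:20]])` line
def pvKeywords : List String :=
  ["python", "javascript", "react", "kubernetes", "docker",
   "machine learning", "deep learning", "neural networks",
   "system design", "architecture", "distributed systems",
   "startup", "business", "product", "entrepreneurship"]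

def pvAllTitles (videos : List (List (String × String))) : String :=
  PySem.Str.join " "
    ((PySem.List.slice videos none (some 20)).map
      (fun v => PySem.Str.lower (PySem.Dict.getD (PySem.Dict.mk v) "title" "")))

-- ===== PORT A =====
def identify_expertise_areas_py (videos : List (List (String × String))) : List String :=
  let all_titles := pvAllTitles videos
  let expertise_keywords : PySem.Dict String Int :=
    pvKeywords.foldl
      (fun d keyword =>
        if PySem.Str.isIn keyword all_titles then
          d.insert keyword (d.getD keyword 0 + (PySem.Str.count all_titles keyword : Int))
        else d)
      (PySem.Dict.mk [])
  let sorted_expertise := PySem.List.sorted expertise_keywords.items (fun x => x.2) true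
  (PySem.List.slice sorted_expertise none (some 5)).map (fun x => x.1)

-- ===== PORT B =====
-- `for p in pairs[1:]: if p[1] > best[1]: best = p`
def pvFirstMax (best0 : String × Int) (rest : List (String × Int)) : String × Int :=
  rest.foldl (fun best p => if p.2 > best.2 then p else best) best0

-- the `for _ in range(5)` selection loop; remove? cannot return none (best ∈ pairs), branch is dead
def pvSelect : Nat → List (String × Int) → List String
  | 0, _ => []
  | _ + 1, [] => []
  | k + 1, x :: t =>
    let best := pvFirstMax x t
    match PySem.List.remove? (x :: t) best with
    | some rest => best.1 :: pvSelect k rest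
    | none => []

def identify_expertise_areas_py_alt (videos : List (List (String × String))) : List String :=
  let all_titles := pvAllTitles videos
  let pairs :=
    (pvKeywords.filter (fun kw => PySem.Str.isIn kw all_titles)).map
      (fun kw => (kw, (PySem.Str.count all_titles kw : Int)))
  pvSelect 5 pairs

-- ===== PRECONDITION & SPEC =====
def Spec_identify_expertise_areas_py (videos : List (List (String × String))) (out : List String) : Prop := out = identify_expertise_areas_py_alt videos
instance (videos : List (List (String × String))) (out : List String) : Decidable (Spec_identify_expertise_areas_py videos out) := by unfold Spec_identify_expertise_areas_py; infer_instance

-- ===== CLAIM (what is proved, stated in full; the proofs are below) =====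
def Claim_equal_identify_expertise_areas_py : Prop := ∀ (videos : List (List (String × String))), Dom_identify_expertise_areas_py videos → Spec_identify_expertise_areas_py videos (identify_expertise_areas_py videos)

-- ===== LEMMAS AND PROOFS =====


theorem pv_contains_false (d : PySem.Dict String Int) (k : String) (h : d.get? k = none) :
    d.contains k = false := by
  simp [PySem.Dict.get?, List.find?_eq_none] at h
  simp [PySem.Dict.contains, List.any_eq_false]
  intro p hp
  exact h p hp

theorem pv_dict_fold_items (s : String) (ks : List String) (d : PySem.Dict String Int)
    (hfresh : ∀ kw ∈ ks, d.get? kw = none) (hnd : ks.Nodup) :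
    (ks.foldl
      (fun d keyword =>
        if PySem.Str.isIn keyword s then
          d.insert keyword (d.getD keyword 0 + (PySem.Str.count s keyword : Int))
        else d) d).items
    = d.items ++ (ks.filter (fun kw => PySem.Str.isIn kw s)).map
        (fun kw => (kw, (PySem.Str.count s kw : Int))) := by
  induction ks generalizing d with
  | nil => simp
  | cons kw ks ih =>
    have hk : d.get? kw = none := hfresh kw (by simp)
    have hc : d.contains kw = false := pv_contains_false d kw hk
    have hnd' : ks.Nodup := hnd.of_cons
    have hkw : kw ∉ ks := by
      intro hmem
      exact (List.nodup_cons.mp hnd).1 hmem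
    by_cases hin : PySem.Str.isIn kw s
    · have hgd : d.getD kw 0 = 0 := by simp [PySem.Dict.getD, hk]
      have hfresh' : ∀ k' ∈ ks, (d.insert kw (d.getD kw 0 + (PySem.Str.count s kw : Int))).get? k' = none := by
        intro k' hk'
        rw [PySem.Dict.get?_insert]
        have : k' ≠ kw := fun he => hkw (he ▸ hk')
        simp [this]
        exact hfresh k' (by simp [hk'])
      have hit : (d.insert kw (d.getD kw 0 + (PySem.Str.count s kw : Int))).items
          = d.items ++ [(kw, (PySem.Str.count s kw : Int))] := by
        simp [PySem.Dict.insert, hc, hgd]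
      simp only [List.foldl_cons, hin, if_pos]
      rw [ih _ hfresh' hnd', hit, List.filter_cons_of_pos (by simpa using hin)]
      simp
    · simp only [List.foldl_cons, if_neg hin]
      rw [ih _ (fun k' hk' => hfresh k' (by simp [hk'])) hnd', List.filter_cons_of_neg (by simpa using hin)]


theorem pv_sorted_rev_concat {α : Type} (key : α → Int) (xs : List α) (x : α) :
    PySem.List.sorted (xs ++ [x]) key true
      = PySem.List.insertBy (fun a b => decide (key b < key a)) x (PySem.List.sorted xs key true) := by
  rw [PySem.List.sorted_rev_eq_foldl_insertBy, PySem.List.sorted_rev_eq_foldl_insertBy,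
    List.foldl_append]
  rfl

theorem pv_sorted_rev_extract {α : Type} (key : α → Int) (pre suf : List α) (m : α)
    (h1 : ∀ a ∈ pre, key a < key m) (h2 : ∀ a ∈ suf, key a ≤ key m) :
    PySem.List.sorted (pre ++ m :: suf) key true = m :: PySem.List.sorted (pre ++ suf) key true := by
  induction suf using List.reverseRecOn with
  | nil =>
    rw [pv_sorted_rev_concat]
    cases hs : PySem.List.sorted pre key true with
    | nil => simp [PySem.List.insertBy, hs]
    | cons y ys =>
      have hy : y ∈ pre := by
        have := (PySem.List.mem_sorted (xs := pre) (key := key) (rev := true) (x := y)).mp (by rw [hs]; simp)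
        exact this
      have : key y < key m := h1 y hy
      simp [PySem.List.insertBy, this, hs]
  | append_singleton suf a ih =>
    have ha : key a ≤ key m := h2 a (by simp)
    have h2' : ∀ b ∈ suf, key b ≤ key m := fun b hb => h2 b (by simp [hb])
    have e1 : pre ++ m :: (suf ++ [a]) = (pre ++ m :: suf) ++ [a] := by simp
    have e2 : pre ++ (suf ++ [a]) = (pre ++ suf) ++ [a] := by simp
    rw [e1, e2, pv_sorted_rev_concat, pv_sorted_rev_concat, ih h2']
    have : decide (key m < key a) = false := by simp; omega
    simp [PySem.List.insertBy, this]


theorem pv_firstMax_cons (x a : String × Int) (t : List (String × Int)) :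
    pvFirstMax x (a :: t) = pvFirstMax (if a.2 > x.2 then a else x) t := rfl

theorem pv_firstMax_split (x : String × Int) (t : List (String × Int)) :
    ∃ pre suf, x :: t = pre ++ pvFirstMax x t :: suf
      ∧ (∀ a ∈ pre, a.2 < (pvFirstMax x t).2) ∧ (∀ a ∈ suf, a.2 ≤ (pvFirstMax x t).2) := by
  induction t generalizing x with
  | nil => exact ⟨[], [], by simp [pvFirstMax]⟩
  | cons a t ih =>
    rw [pv_firstMax_cons]
    by_cases hax : a.2 > x.2
    · rw [if_pos hax]
      obtain ⟨pre, suf, he, hpre, hsuf⟩ := ih a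
      have hafm : a.2 ≤ (pvFirstMax a t).2 := by
        cases pre with
        | nil =>
          have hh : a = pvFirstMax a t := by simpa using congrArg (fun l => l.head?) he
          rw [← hh]
        | cons p pre' =>
          have hpa : a = p := by simpa using congrArg (fun l => l.head?) he
          have := hpre p (by simp)
          rw [← hpa] at this
          omega
      refine ⟨x :: pre, suf, by rw [List.cons_append, ← he], ?_, hsuf⟩
      intro b hb
      rcases List.mem_cons.mp hb with h | h
      · subst h; omega
      · exact hpre b h
    · rw [if_neg hax]
      obtain ⟨pre, suf, he, hpre, hsuf⟩ := ih x
      cases pre with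
      | nil =>
        simp only [List.nil_append] at he
        have hx : pvFirstMax x t = x := by
          have := congrArg (fun l => l.head?) he; simpa using this.symm
        have ht : t = suf := by
          have := congrArg List.tail he; simpa using this
        refine ⟨[], a :: t, by simp [hx], by simp, ?_⟩
        intro b hb
        rcases List.mem_cons.mp hb with h | h
        · subst h; rw [hx]; omega
        · rw [ht] at h; rw [hx] at hsuf ⊢; exact hsuf b h
      | cons p pre' =>
        have hp : x = p := by simpa using congrArg (fun l => l.head?) he
        have ht : t = pre' ++ pvFirstMax x t :: suf := by
          have := congrArg List.tail he; simpa using this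
        refine ⟨x :: a :: pre', suf, by rw [List.cons_append, List.cons_append, ← ht], ?_, hsuf⟩
        intro b hb
        have hxfm : x.2 < (pvFirstMax x t).2 := by
          have := hpre p (by simp); rwa [← hp] at this
        rcases List.mem_cons.mp hb with h | h
        · subst h; exact hxfm
        rcases List.mem_cons.mp h with h | h
        · subst h; omega
        · exact hpre b (by simp [h])


theorem pv_remove_split (pre suf : List (String × Int)) (v : String × Int) (h : v ∉ pre) :
    PySem.List.remove? (pre ++ v :: suf) v = some (pre ++ suf) := by
  have hidx : List.idxOf? v (pre ++ v :: suf) = some pre.length := by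
    rw [List.idxOf?_eq_some_iff]
    refine ⟨by simp, by simp, ?_⟩
    intro j hj
    rw [List.getElem_append_left hj]
    intro hv
    exact h (hv ▸ List.getElem_mem hj)
  simp only [PySem.List.remove?, hidx, Option.map_some]
  congr 1
  rw [List.eraseIdx_append]
  simp

theorem pv_select_eq_sorted (k : Nat) (pairs : List (String × Int)) :
    pvSelect k pairs = ((PySem.List.sorted pairs (fun x => x.2) true).take k).map Prod.fst := by
  induction k generalizing pairs with
  | zero => simp [pvSelect]
  | succ k ih =>
    cases pairs with
    | nil => simp [pvSelect, PySem.List.sorted]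
    | cons x t =>
      obtain ⟨pre, suf, he, hpre, hsuf⟩ := pv_firstMax_split x t
      have hnotin : pvFirstMax x t ∉ pre := by
        intro hm
        have := hpre _ hm
        omega
      have hrem : PySem.List.remove? (x :: t) (pvFirstMax x t) = some (pre ++ suf) := by
        rw [he]
        exact pv_remove_split pre suf _ hnotin
      have hsort : PySem.List.sorted (x :: t) (fun p => p.2) true
          = pvFirstMax x t :: PySem.List.sorted (pre ++ suf) (fun p => p.2) true := by
        rw [he]
        exact pv_sorted_rev_extract _ pre suf _ hpre hsuf
      simp only [pvSelect, hrem, hsort, List.take_succ_cons, List.map_cons]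
      rw [ih]

-- ===== VERDICT (by name: the statement is the Claim_ definition above) =====
theorem identify_expertise_areas_py_spec : Claim_equal_identify_expertise_areas_py := by
  intro videos _hdom
  show List.map (fun x => x.1)
      (PySem.List.slice
        (PySem.List.sorted
          (List.foldl
            (fun d keyword =>
              if PySem.Str.isIn keyword (pvAllTitles videos) then
                d.insert keyword (d.getD keyword 0 + (PySem.Str.count (pvAllTitles videos) keyword : Int))
              else d)
            (PySem.Dict.mk []) pvKeywords).items
          (fun x => x.2) true)
        none (some 5))
    = pvSelect 5
        ((pvKeywords.filter (fun kw => PySem.Str.isIn kw (pvAllTitles videos))).map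
          (fun kw => (kw, (PySem.Str.count (pvAllTitles videos) kw : Int))))
  rw [pv_dict_fold_items (pvAllTitles videos) pvKeywords (PySem.Dict.mk [])
    (fun kw _ => by simp [PySem.Dict.get?]) (by decide)]
  rw [PySem.List.slice_to _ (by norm_num), pv_select_eq_sorted]
  rfl
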